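-- pv_equiv track=rewrite | github.com/KamKava/easy_to_remember | Implementation/Easy_to_remember/application/ranker/phone_ranker.py | phone_pattern_similarity
-- ===== SOURCE A (Python) =====
-- def phone_pattern_similarity(pattern, digits):
--     same_digit_count = 0
--     for d in set(pattern):
--         same_digit_count += min(pattern.count(d), digits.count(d))
--
--     # Find longest chunk og the pattern
--     longest_chunk = 0
--     for i in range(len(pattern)):
--         for j in range(i + 1, len(pattern) + 1):
--             chunk = pattern[i:j]
--             if chunk and chunk in digits:
--                 longest_chunk = max(longest_chunk, len(chunk))
--
--     # Final similarity score combination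
--     return same_digit_count + longest_chunk
-- ===== SOURCE B (Python) =====
-- def phone_pattern_similarity(pattern, digits):
--     # digit overlap: two counting dicts built once (no repeated .count scans)
--     cnt_p = {}
--     for c in pattern:
--         cnt_p[c] = cnt_p.get(c, 0) + 1
--     cnt_d = {}
--     for c in digits:
--         cnt_d[c] = cnt_d.get(c, 0) + 1
--     same_digit_count = 0
--     for c, k in cnt_p.items():
--         same_digit_count += min(k, cnt_d.get(c, 0))
--
--     # longest common substring: grow the length while a window one longer matches
--     n = len(pattern)
--     longest = 0
--     while any(pattern[i:i + longest + 1] in digits for i in range(n - longest)):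
--         longest += 1
--
--     return same_digit_count + longest
-- ===== Notes on version B (the rewrite author's own statement) =====
-- stated objective: faster
-- what changed: Digit overlap is computed from two counting dicts built in one pass each (instead of calling .count twice per distinct character), and the longest common chunk is found by growing the candidate length one step at a time and stopping at the first length with no matching window, instead of enumerating all O(n^2) chunks.
import Mathlib
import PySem

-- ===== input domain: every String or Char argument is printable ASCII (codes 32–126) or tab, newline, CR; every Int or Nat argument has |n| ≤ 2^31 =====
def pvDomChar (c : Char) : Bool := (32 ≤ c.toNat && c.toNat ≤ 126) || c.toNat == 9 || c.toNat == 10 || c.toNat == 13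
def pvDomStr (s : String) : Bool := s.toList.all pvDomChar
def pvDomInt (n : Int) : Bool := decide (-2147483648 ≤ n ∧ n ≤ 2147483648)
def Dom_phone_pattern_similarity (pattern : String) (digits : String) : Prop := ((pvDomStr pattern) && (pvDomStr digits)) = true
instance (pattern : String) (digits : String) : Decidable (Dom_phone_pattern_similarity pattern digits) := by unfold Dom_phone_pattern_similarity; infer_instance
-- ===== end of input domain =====

-- B replaces A's repeated pattern.count/digits.count scans by two counting dicts built once,
-- and replaces A's enumeration of all O(n^2) chunks by growing the common-substring length
-- one step at a time, stopping at the first length with no match (objective: faster on typical inputs).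

-- ===== PORT A =====
def phone_pattern_similarity (pattern : String) (digits : String) : Int :=
  -- same_digit_count = 0; for d in set(pattern): same_digit_count += min(pattern.count(d), digits.count(d))
  let same_digit_count : Int :=
    (PySem.Set.ofList pattern.toList).foldl
      (fun acc d => acc + min ((pattern.toList.count d : Int)) ((digits.toList.count d : Int))) 0
  -- longest_chunk = 0; for i in range(len(pattern)): for j in range(i+1, len(pattern)+1):
  --   chunk = pattern[i:j]; if chunk and chunk in digits: longest_chunk = max(longest_chunk, len(chunk))
  let longest_chunk : Int :=
    (PySem.List.pyRange 0 (pattern.toList.length : Int) 1).foldl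
      (fun lc i =>
        (PySem.List.pyRange (i + 1) ((pattern.toList.length : Int) + 1) 1).foldl
          (fun lc j =>
            let chunk := PySem.List.slice pattern.toList (some i) (some j)
            if chunk ≠ [] ∧ PySem.Chars.isIn chunk digits.toList = true
            then max lc (chunk.length : Int) else lc) lc) 0
  same_digit_count + longest_chunk

-- ===== PORT B =====
-- cnt = {}; for c in s: cnt[c] = cnt.get(c, 0) + 1
def pvCount (s : List Char) : PySem.Dict Char Int :=
  s.foldl (fun d c => d.insert c (d.getD c 0 + 1)) PySem.Dict.empty

-- longest = 0; while any(pattern[i:i+longest+1] in digits for i in range(n - longest)): longest += 1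
-- (fuel = n bounds the loop: longest grows by one per iteration and any length that matches is ≤ n)
def pvGrow (P D : List Char) : Nat → Nat → Nat
  | 0, longest => longest
  | fuel + 1, longest =>
      if (List.range (P.length - longest)).any
          (fun i => PySem.Chars.isIn
            (PySem.List.slice P (some (i : Int)) (some ((i : Int) + (longest : Int) + 1))) D)
      then pvGrow P D fuel (longest + 1)
      else longest

def phone_pattern_similarity_alt (pattern : String) (digits : String) : Int :=
  let cnt_p := pvCount pattern.toList
  let cnt_d := pvCount digits.toList
  let same_digit_count : Int :=
    cnt_p.items.foldl (fun acc ck => acc + min ck.2 (cnt_d.getD ck.1 0)) 0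
  let longest : Nat := pvGrow pattern.toList digits.toList pattern.toList.length 0
  same_digit_count + (longest : Int)

-- ===== PRECONDITION & SPEC =====
def Spec_phone_pattern_similarity (pattern : String) (digits : String) (out : Int) : Prop := out = phone_pattern_similarity_alt pattern digits
instance (pattern : String) (digits : String) (out : Int) : Decidable (Spec_phone_pattern_similarity pattern digits out) := by unfold Spec_phone_pattern_similarity; infer_instance

-- ===== CLAIM (what is proved, stated in full; the proofs are below) =====
def Claim_equal_phone_pattern_similarity : Prop := ∀ (pattern : String) (digits : String), Dom_phone_pattern_similarity pattern digits → Spec_phone_pattern_similarity pattern digits (phone_pattern_similarity pattern digits)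

-- ===== LEMMAS AND PROOFS =====

-- window of P of length L starting at i
def pvWin (P : List Char) (i L : Nat) : List Char := (P.drop i).take L

-- "some window of length L occurs inside D"
def pvEx (P D : List Char) (L : Nat) : Prop :=
  ∃ i : Nat, i + L ≤ P.length ∧ pvWin P i L <:+: D

theorem pvEx_zero (P D : List Char) : pvEx P D 0 :=
  ⟨0, by omega, by simp [pvWin]⟩

theorem pvEx_succ {P D : List Char} {L : Nat} (h : pvEx P D (L + 1)) : pvEx P D L := by
  obtain ⟨i, hle, hinf⟩ := h
  refine ⟨i, by omega, ?_⟩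
  have hpre : pvWin P i L <+: pvWin P i (L + 1) := by
    have : pvWin P i L = (pvWin P i (L + 1)).take L := by
      simp [pvWin, List.take_take]
    rw [this]; exact List.take_prefix _ _
  exact hpre.isInfix.trans hinf

theorem pvEx_of_le (P D : List Char) : ∀ L K : Nat, K ≤ L → pvEx P D L → pvEx P D K := by
  intro L
  induction L with
  | zero => intro K hK h; have hK0 := Nat.le_zero.mp hK; subst hK0; exact h
  | succ n ih =>
      intro K hK h
      rcases Nat.lt_or_ge K (n + 1) with h1 | h2
      · exact ih K (by omega) (pvEx_succ h)
      · have : K = n + 1 := by omega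
        rw [this]; exact h

theorem pvEx_le_len {P D : List Char} {K : Nat} (h : pvEx P D K) : K ≤ P.length := by
  obtain ⟨i, hle, _⟩ := h; omega

-- B's loop test at state `longest = L` holds iff some window of length L+1 occurs in D
theorem pvCond_iff (P D : List Char) (L : Nat) :
    ((List.range (P.length - L)).any
      (fun i => PySem.Chars.isIn
        (PySem.List.slice P (some (i : Int)) (some ((i : Int) + (L : Int) + 1))) D)) = true
    ↔ pvEx P D (L + 1) := by
  rw [List.any_eq_true]
  have hs : ∀ i : Nat,
      PySem.List.slice P (some (i : Int)) (some ((i : Int) + (L : Int) + 1)) = pvWin P i (L + 1) := by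
    intro i
    have hcast : (i : Int) + (L : Int) + 1 = (i : Int) + ((L + 1 : Nat) : Int) := by
      push_cast; ring
    rw [hcast, PySem.List.slice_natCast_add]
    rfl
  constructor
  · rintro ⟨i, hi, hin⟩
    rw [List.mem_range] at hi
    refine ⟨i, by omega, ?_⟩
    rw [hs i] at hin
    exact (PySem.Chars.isIn_iff_infix _ _).mp hin
  · rintro ⟨i, hle, hinf⟩
    refine ⟨i, ?_, ?_⟩
    · rw [List.mem_range]; omega
    · rw [hs i]; exact (PySem.Chars.isIn_iff_infix _ _).mpr hinf

theorem pvGrow_ex (P D : List Char) :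
    ∀ fuel L, pvEx P D L → pvEx P D (pvGrow P D fuel L) := by
  intro fuel
  induction fuel with
  | zero => intro L h; simpa [pvGrow] using h
  | succ n ih =>
      intro L h
      by_cases hc : ((List.range (P.length - L)).any
          (fun i => PySem.Chars.isIn
            (PySem.List.slice P (some (i : Int)) (some ((i : Int) + (L : Int) + 1))) D)) = true
      · rw [pvGrow, if_pos hc]
        exact ih (L + 1) ((pvCond_iff P D L).mp hc)
      · rw [pvGrow, if_neg hc]
        exact h

theorem pvGrow_ge (P D : List Char) :
    ∀ fuel L K, pvEx P D K → K ≤ L + fuel → K ≤ pvGrow P D fuel L := by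
  intro fuel
  induction fuel with
  | zero => intro L K _ hle; simpa [pvGrow] using hle
  | succ n ih =>
      intro L K hK hle
      by_cases hc : ((List.range (P.length - L)).any
          (fun i => PySem.Chars.isIn
            (PySem.List.slice P (some (i : Int)) (some ((i : Int) + (L : Int) + 1))) D)) = true
      · rw [pvGrow, if_pos hc]
        exact ih (L + 1) K hK (by omega)
      · rw [pvGrow, if_neg hc]
        by_contra hgt
        have hKL : L + 1 ≤ K := by omega
        have : pvEx P D (L + 1) := pvEx_of_le P D K (L + 1) hKL hK
        exact hc ((pvCond_iff P D L).mpr this)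

-- generic foldl-max helpers (over Int accumulators)
theorem pvFoldl_ge_init {α : Type} (f : Int → α → Int) (h : ∀ a x, a ≤ f a x) :
    ∀ (l : List α) (a : Int), a ≤ l.foldl f a := by
  intro l
  induction l with
  | nil => intro a; simp
  | cons x t ih => intro a; exact le_trans (h a x) (ih (f a x))

theorem pvFoldl_le {α : Type} (f : Int → α → Int) (c : Int) :
    ∀ (l : List α), (∀ a x, x ∈ l → a ≤ c → f a x ≤ c) → ∀ a, a ≤ c → l.foldl f a ≤ c := by
  intro l
  induction l with
  | nil => intro _ a ha; simpa using ha
  | cons x t ih =>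
      intro h a ha
      exact ih (fun a y hy => h a y (List.mem_cons_of_mem _ hy))
        (f a x) (h a x (List.mem_cons_self) ha)

theorem pvLe_foldl {α : Type} (f : Int → α → Int) (h : ∀ a x, a ≤ f a x) (c : Int) :
    ∀ (l : List α) (x : α), x ∈ l → (∀ a, c ≤ f a x) → ∀ a, c ≤ l.foldl f a := by
  intro l
  induction l with
  | nil => intro x hx; simp at hx
  | cons y t ih =>
      intro x hx hc a
      rw [List.foldl_cons]
      rcases List.mem_cons.mp hx with h1 | h2
      · subst h1
        exact le_trans (hc a) (pvFoldl_ge_init f h t (f a x))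
      · exact ih x h2 hc (f a y)

-- A's nested max loop computes exactly B's grown length
theorem pvLongest_eq (P D : List Char) :
    (PySem.List.pyRange 0 (P.length : Int) 1).foldl
      (fun lc i =>
        (PySem.List.pyRange (i + 1) ((P.length : Int) + 1) 1).foldl
          (fun lc j =>
            let chunk := PySem.List.slice P (some i) (some j)
            if chunk ≠ [] ∧ PySem.Chars.isIn chunk D = true
            then max lc (chunk.length : Int) else lc) lc) 0
    = ((pvGrow P D P.length 0 : Nat) : Int) := by
  set BL := pvGrow P D P.length 0 with hBL
  have hex : pvEx P D BL := pvGrow_ex P D P.length 0 (pvEx_zero P D)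
  have hmax : ∀ K, pvEx P D K → K ≤ BL := by
    intro K hK
    exact pvGrow_ge P D P.length 0 K hK (by simpa using pvEx_le_len hK)
  set inner : Int → Int → Int → Int := fun i lc j =>
    (fun lc j =>
      let chunk := PySem.List.slice P (some i) (some j)
      if chunk ≠ [] ∧ PySem.Chars.isIn chunk D = true
      then max lc (chunk.length : Int) else lc) lc j with hinner
  have hinner_mono : ∀ (i : Int) (a : Int) (j : Int), a ≤ inner i a j := by
    intro i a j
    simp only [hinner]
    split
    · exact le_max_left _ _
    · exact le_refl _
  have houter_mono : ∀ (a : Int) (i : Int),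
      a ≤ (PySem.List.pyRange (i + 1) ((P.length : Int) + 1) 1).foldl (inner i) a := by
    intro a i
    exact pvFoldl_ge_init (inner i) (hinner_mono i) _ a
  apply le_antisymm
  · -- every chunk found by A has length ≤ BL
    apply pvFoldl_le _ ((BL : Nat) : Int)
    · intro a i hi ha
      apply pvFoldl_le (inner i) _ _ _ a ha
      intro b j hj hb
      simp only [hinner]
      split
      · rename_i hcond
        obtain ⟨hne, hin⟩ := hcond
        have hi' := PySem.List.mem_pyRange_one.mp hi
        have hj' := PySem.List.mem_pyRange_one.mp hj
        have h0i : 0 ≤ i := hi'.1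
        have h0j : 0 ≤ j := by omega
        have hslice : PySem.List.slice P (some i) (some j)
            = pvWin P i.toNat (j.toNat - i.toNat) := by
          rw [PySem.List.slice_toNat P h0i h0j, pvWin]
        have hjn : j.toNat ≤ P.length := by omega
        have hij : i.toNat ≤ j.toNat := by omega
        have hexK : pvEx P D (j.toNat - i.toNat) := by
          refine ⟨i.toNat, by omega, ?_⟩
          rw [← hslice]
          exact (PySem.Chars.isIn_iff_infix _ _).mp hin
        have hlen : (PySem.List.slice P (some i) (some j)).length = j.toNat - i.toNat := by
          rw [hslice, pvWin, List.length_take, List.length_drop]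
          omega
        have hKle : j.toNat - i.toNat ≤ BL := hmax _ hexK
        rw [hlen]
        exact max_le hb (by exact_mod_cast hKle)
      · exact hb
    · positivity
  · -- BL is realised by some chunk A inspects (or BL = 0)
    obtain ⟨i0, hi0, hinf0⟩ := hex
    rcases Nat.eq_zero_or_pos BL with h0 | hpos
    · rw [h0]
      simp only [Nat.cast_zero]
      exact pvFoldl_ge_init _ houter_mono _ 0
    · have hi0n : i0 < P.length := by omega
      have hmem_i : (i0 : Int) ∈ PySem.List.pyRange 0 (P.length : Int) 1 := by
        rw [PySem.List.mem_pyRange_one]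
        constructor
        · positivity
        · exact_mod_cast hi0n
      have hmem_j : ((i0 : Int) + (BL : Int)) ∈ PySem.List.pyRange ((i0 : Int) + 1) ((P.length : Int) + 1) 1 := by
        rw [PySem.List.mem_pyRange_one]
        constructor
        · have : (1 : Int) ≤ (BL : Int) := by exact_mod_cast hpos
          omega
        · have : (i0 : Int) + (BL : Int) ≤ (P.length : Int) := by exact_mod_cast hi0
          omega
      apply pvLe_foldl _ houter_mono _ _ _ hmem_i
      intro a
      apply pvLe_foldl (inner (i0 : Int)) (hinner_mono _) _ _ _ hmem_j
      intro b
      simp only [hinner]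
      have hslice : PySem.List.slice P (some (i0 : Int)) (some ((i0 : Int) + (BL : Int)))
          = pvWin P i0 BL := PySem.List.slice_natCast_add P i0 BL
      have hlen : (pvWin P i0 BL).length = BL := by
        rw [pvWin, List.length_take, List.length_drop]; omega
      rw [hslice]
      rw [if_pos]
      · rw [hlen]; exact le_max_right _ _
      · constructor
        · intro hnil
          rw [hnil] at hlen
          simp at hlen
          omega
        · exact (PySem.Chars.isIn_iff_infix _ _).mpr hinf0

-- B's counting dicts compute A's sum over set(pattern)
theorem pvSame_eq (P D : List Char) :
    (pvCount P).items.foldl (fun acc ck => acc + min ck.2 ((pvCount D).getD ck.1 0)) 0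
    = (PySem.Set.ofList P).foldl
        (fun acc d => acc + min ((P.count d : Int)) ((D.count d : Int))) 0 := by
  have hp : pvCount P = PySem.Dict.counter P :=
    PySem.Dict.foldl_insert_getD_add_one_eq_counter P
  have hd : pvCount D = PySem.Dict.counter D :=
    PySem.Dict.foldl_insert_getD_add_one_eq_counter D
  rw [hp, hd, PySem.Dict.items_counter, List.foldl_map]
  simp only [PySem.Dict.getD_counter]

-- ===== VERDICT (by name: the statement is the Claim_ definition above) =====
theorem phone_pattern_similarity_spec : Claim_equal_phone_pattern_similarity := by
  intro pattern digits _
  show phone_pattern_similarity pattern digits = phone_pattern_similarity_alt pattern digits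
  unfold phone_pattern_similarity phone_pattern_similarity_alt
  simp only [pvSame_eq, pvLongest_eq]
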